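-- pv_equiv track=rewrite | github.com/NguyenThiThuyNgan-2807/THI_CK | oncki.py | question_26
-- ===== SOURCE A (Python) =====
-- def question_26(s: str):
--     ds_dem={}
--     for char in s:
--         ds_dem[char]=ds_dem.get(char,0)+1
--     length=0
--     for val in ds_dem.values():
--         length+=val//2*2
--     if length<len(s):
--         length=length+1
--     return length
-- ===== SOURCE B (Python) =====
-- def question_26(s: str):
--     odd = set()
--     for ch in s:
--         if ch in odd:
--             odd.discard(ch)
--         else:
--             odd.add(ch)
--     return len(s) - len(odd) + (1 if odd else 0)
-- ===== Notes on version B (the rewrite author's own statement) =====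
-- stated objective: alternative
-- what changed: Replaces the count dict plus a second loop over its values with a single-pass parity toggle set and the closed-form answer len(s) - len(odd) + (1 if odd else 0).
import Mathlib
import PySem

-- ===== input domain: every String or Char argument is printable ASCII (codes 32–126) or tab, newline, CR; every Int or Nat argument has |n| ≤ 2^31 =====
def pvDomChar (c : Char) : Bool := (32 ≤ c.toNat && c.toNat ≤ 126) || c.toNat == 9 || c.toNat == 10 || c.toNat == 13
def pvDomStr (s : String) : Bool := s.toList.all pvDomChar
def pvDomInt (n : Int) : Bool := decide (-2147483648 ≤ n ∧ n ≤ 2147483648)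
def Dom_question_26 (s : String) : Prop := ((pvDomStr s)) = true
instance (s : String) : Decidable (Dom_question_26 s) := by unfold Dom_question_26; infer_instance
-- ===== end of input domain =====

-- B replaces the count dict + second loop over its values by a single-pass parity
-- toggle set and the closed-form answer len(s) - len(odd) + (1 if odd else 0).

-- ===== PORT A =====
def question_26 (s : String) : Int :=
  let ds_dem := s.toList.foldl (fun d c => d.insert c (d.getD c 0 + 1))
    (PySem.Dict.empty : PySem.Dict Char Int)
  let length := ds_dem.values.foldl (fun acc v => acc + PySem.Int.floordiv v 2 * 2) 0
  if length < PySem.Str.len s then length + 1 else length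

-- ===== PORT B =====
-- toggle: discard the char if present, else add it (the loop body of Source B)
def pvToggle (o : PySem.Set Char) (c : Char) : PySem.Set Char :=
  if PySem.Set.contains o c then PySem.Set.discard o c else PySem.Set.add o c

def question_26_alt (s : String) : Int :=
  let odd := s.toList.foldl pvToggle (PySem.Set.empty : PySem.Set Char)
  PySem.Str.len s - PySem.Set.len odd + (if odd ≠ [] then 1 else 0)

-- ===== PRECONDITION & SPEC =====
def Spec_question_26 (s : String) (out : Int) : Prop := out = question_26_alt s
instance (s : String) (out : Int) : Decidable (Spec_question_26 s out) := by unfold Spec_question_26; infer_instance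

-- ===== CLAIM (what is proved, stated in full; the proofs are below) =====
def Claim_equal_question_26 : Prop := ∀ (s : String), Dom_question_26 s → Spec_question_26 s (question_26 s)

-- ===== LEMMAS AND PROOFS =====

-- the parity-toggle fold: result is nodup and holds exactly the chars whose
-- parity flipped an odd number of times relative to the accumulator
lemma toggle_fold_spec (l : List Char) : ∀ (acc : PySem.Set Char), acc.Nodup →
    (l.foldl pvToggle acc).Nodup ∧
    ∀ c, c ∈ l.foldl pvToggle acc ↔
      (if c ∈ acc then l.count c % 2 = 0 else l.count c % 2 = 1) := by
  induction l with
  | nil =>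
    intro acc h
    refine ⟨h, fun c => ?_⟩
    simp only [List.foldl_nil, List.count_nil]
    split_ifs with hc <;> simp [hc]
  | cons x t ih =>
    intro acc hacc
    have hstep : (pvToggle acc x).Nodup := by
      unfold pvToggle
      split_ifs
      · exact PySem.Set.nodup_discard acc x hacc
      · exact PySem.Set.nodup_add acc x hacc
    obtain ⟨hnd, hmem⟩ := ih (pvToggle acc x) hstep
    refine ⟨by simpa using hnd, fun c => ?_⟩
    have htog : c ∈ pvToggle acc x ↔ (if c = x then c ∉ acc else c ∈ acc) := by
      unfold pvToggle
      by_cases hx : x ∈ acc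
      · rw [if_pos ((PySem.Set.contains_iff acc x).mpr hx), PySem.Set.mem_discard]
        by_cases hcx : c = x
        · subst hcx; simp [hx]
        · simp [hcx]
      · rw [if_neg (fun h => hx ((PySem.Set.contains_iff acc x).mp h)), PySem.Set.mem_add]
        by_cases hcx : c = x
        · subst hcx; simp [hx]
        · simp [hcx]
    simp only [List.foldl_cons, hmem c, htog]
    by_cases hcx : c = x
    · subst hcx
      by_cases hc : c ∈ acc <;>
        simp only [hc, List.count_cons_self, if_true, if_false, not_true, not_false_iff] <;> omega
    · have hxc : ¬ x = c := fun h => hcx h.symm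
      simp [hcx, hxc]

-- sum of (f x - g x) over a list, in Int
lemma sum_map_sub_int (xs : List Char) (f g : Char → Int) :
    (xs.map (fun x => f x - g x)).sum = (xs.map f).sum - (xs.map g).sum := by
  induction xs with
  | nil => simp
  | cons x t ih => simp [ih]; ring

-- the distinct chars of l, as A's dict keys / B's parity universe
lemma sum_counts_over_ofList (l : List Char) :
    ((PySem.Set.ofList l).map (fun k => l.count k)).sum = l.length := by
  have hperm : (PySem.Set.ofList l).Perm l.dedup := by
    rw [List.perm_ext_iff_of_nodup (PySem.Set.nodup_ofList l) l.nodup_dedup]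
    intro a; rw [PySem.Set.mem_ofList, List.mem_dedup]
  calc ((PySem.Set.ofList l).map (fun k => l.count k)).sum
      = (l.dedup.map (fun k => l.count k)).sum := (hperm.map _).sum_eq
    _ = l.length := List.sum_map_count_dedup_eq_length l

-- A's accumulated 'length' equals len(l) minus the number of odd-count chars
lemma a_length_eq (l : List Char) :
    ((PySem.Dict.counter l : PySem.Dict Char Int).values.foldl
        (fun acc v => acc + PySem.Int.floordiv v 2 * 2) 0)
      = (l.length : Int) - ((PySem.Set.ofList l).countP (fun k => l.count k % 2 == 1) : Int) := by
  have hvals : (PySem.Dict.counter l : PySem.Dict Char Int).values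
      = (PySem.Set.ofList l).map (fun k => ((l.count k : Nat) : Int)) := by
    simp only [PySem.Dict.values, PySem.Dict.items_counter, List.map_map]
    rfl
  rw [hvals, PySem.List.foldl_add, zero_add, List.map_map]
  have hterm : ∀ k : Char,
      PySem.Int.floordiv ((l.count k : Nat) : Int) 2 * 2
        = ((l.count k : Nat) : Int) - (if (fun k => l.count k % 2 == 1) k then 1 else 0) := by
    intro k
    have h2 : ((2 : Nat) : Int) = (2 : Int) := by norm_num
    have := PySem.Int.floordiv_natCast (l.count k) 2
    rw [h2] at this
    rw [this]
    by_cases hodd : l.count k % 2 = 1 <;> simp [hodd] <;> omega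
  calc ((PySem.Set.ofList l).map
          ((fun v => PySem.Int.floordiv v 2 * 2) ∘ fun k => ((l.count k : Nat) : Int))).sum
      = ((PySem.Set.ofList l).map (fun k =>
          ((l.count k : Nat) : Int) - (if (fun k => l.count k % 2 == 1) k then 1 else 0))).sum := by
        refine congrArg List.sum (List.map_congr_left fun k _ => ?_)
        exact hterm k
    _ = ((PySem.Set.ofList l).map (fun k => ((l.count k : Nat) : Int))).sum
          - ((PySem.Set.ofList l).map (fun k =>
              (if (fun k => l.count k % 2 == 1) k then 1 else 0))).sum :=
        sum_map_sub_int _ _ _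
    _ = (l.length : Int) - ((PySem.Set.ofList l).countP (fun k => l.count k % 2 == 1) : Int) := by
        rw [PySem.List.sum_map_ite_one_zero]
        congr 1
        rw [← sum_counts_over_ofList l]
        push_cast [List.map_map]
        rfl

-- B's toggle set has exactly one element per odd-count char
lemma b_odd_length (l : List Char) :
    (l.foldl pvToggle (PySem.Set.empty : PySem.Set Char)).length
      = (PySem.Set.ofList l).countP (fun k => l.count k % 2 == 1) := by
  obtain ⟨hnd, hmem⟩ := toggle_fold_spec l PySem.Set.empty (by simp [PySem.Set.empty])
  have hfil : ((PySem.Set.ofList l).filter (fun k => l.count k % 2 == 1)).Nodup :=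
    (PySem.Set.nodup_ofList l).filter _
  have hperm : (l.foldl pvToggle (PySem.Set.empty : PySem.Set Char)).Perm
      ((PySem.Set.ofList l).filter (fun k => l.count k % 2 == 1)) := by
    rw [List.perm_ext_iff_of_nodup hnd hfil]
    intro c
    have h := hmem c
    rw [if_neg (by simp [PySem.Set.empty] : c ∉ (PySem.Set.empty : PySem.Set Char))] at h
    rw [List.mem_filter, PySem.Set.mem_ofList, h]
    constructor
    · intro hodd
      refine ⟨List.count_pos_iff.mp (by omega), by simpa using hodd⟩
    · rintro ⟨_, hodd⟩
      simpa using hodd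
  rw [hperm.length_eq, List.countP_eq_length_filter]

-- ===== VERDICT (by name: the statement is the Claim_ definition above) =====
theorem question_26_spec : Claim_equal_question_26 := by
  intro s _
  unfold Spec_question_26 question_26 question_26_alt
  set l := s.toList with hl
  set K := (PySem.Set.ofList l).countP (fun k => l.count k % 2 == 1) with hK
  have hA : (l.foldl (fun d c => d.insert c (d.getD c 0 + 1))
      (PySem.Dict.empty : PySem.Dict Char Int)).values.foldl
        (fun acc v => acc + PySem.Int.floordiv v 2 * 2) 0
      = (l.length : Int) - (K : Int) := by
    rw [PySem.Dict.foldl_insert_getD_add_one_eq_counter]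
    exact a_length_eq l
  have hBlen : (l.foldl pvToggle (PySem.Set.empty : PySem.Set Char)).length = K :=
    b_odd_length l
  have hlen : PySem.Str.len s = (l.length : Int) := PySem.Str.len_eq s
  have hSetLen : PySem.Set.len (l.foldl pvToggle (PySem.Set.empty : PySem.Set Char))
      = (K : Int) := by
    simp only [PySem.Set.len, hBlen]
  have hne : (l.foldl pvToggle (PySem.Set.empty : PySem.Set Char) ≠ []) ↔ K ≠ 0 := by
    rw [← hBlen]
    simp [List.length_eq_zero_iff]
  simp only [hA, hSetLen, hlen]
  by_cases hK0 : K = 0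
  · rw [if_neg (fun h => hne.mp h hK0), if_neg (by omega : ¬((l.length : Int) - (K : Int) < (l.length : Int)))]
    omega
  · have hKpos : 0 < K := Nat.pos_of_ne_zero hK0
    rw [if_pos (hne.mpr hK0), if_pos (by omega : ((l.length : Int) - (K : Int) < (l.length : Int)))]
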